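-- pv_equiv track=rewrite | github.com/Sujeong-Baek/Practice | 백준/3주차_DP/9465번_스티커.py | serch_max_score
-- ===== SOURCE A (Python) =====
-- def serch_max_score(N, stickers):
--     if N == 1:
--         return max(stickers[0][0], stickers[1][0])
--
--     memo = [[0]*N for _ in range(2)]
--     memo[0][0] = stickers[0][0]
--     memo[0][1] = stickers[0][1] + stickers[1][0]
--     memo[1][0] = stickers[1][0]
--     memo[1][1] = stickers[1][1] + stickers[0][0]
--
--     for i in range(2, N):
--         memo[0][i] = max(memo[1][i-1], memo[1][i-2]) + stickers[0][i]
--         memo[1][i] = max(memo[0][i-1], memo[0][i-2]) + stickers[1][i]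
--     return max(memo[0][N-1], memo[1][N-1])
-- ===== SOURCE B (Python) =====
-- def serch_max_score(N, stickers):
--     if N == 1:
--         return max(stickers[0][0], stickers[1][0])
--     # demand-driven top-down memoization of the same recurrence, run with an
--     # explicit goal stack (no recursion-depth limit); memo dicts per row
--     top = {0: stickers[0][0], 1: stickers[0][1] + stickers[1][0]}
--     bot = {0: stickers[1][0], 1: stickers[1][1] + stickers[0][0]}
--     stack = [(0, N - 1, False), (1, N - 1, False)]
--     while stack:
--         row, i, expanded = stack.pop()
--         memo, other = (top, bot) if row == 0 else (bot, top)
--         if expanded: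
--             memo[i] = stickers[row][i] + max(other[i - 1], other[i - 2])
--         elif i not in memo:
--             stack.append((row, i, True))
--             stack.append((1 - row, i - 1, False))
--             stack.append((1 - row, i - 2, False))
--     return max(top[N - 1], bot[N - 1])
-- ===== Notes on version B (the rewrite author's own statement) =====
-- stated objective: alternative
-- what changed: Replaces A's bottom-up 2xN table fill with a demand-driven top-down memoized evaluation of the same recurrence: per-row memo dicts seeded with the base cases and an explicit goal stack that expands (row,N-1) goals into their dependencies, computing each entry only when its dependencies are memoized.
import Mathlib
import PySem

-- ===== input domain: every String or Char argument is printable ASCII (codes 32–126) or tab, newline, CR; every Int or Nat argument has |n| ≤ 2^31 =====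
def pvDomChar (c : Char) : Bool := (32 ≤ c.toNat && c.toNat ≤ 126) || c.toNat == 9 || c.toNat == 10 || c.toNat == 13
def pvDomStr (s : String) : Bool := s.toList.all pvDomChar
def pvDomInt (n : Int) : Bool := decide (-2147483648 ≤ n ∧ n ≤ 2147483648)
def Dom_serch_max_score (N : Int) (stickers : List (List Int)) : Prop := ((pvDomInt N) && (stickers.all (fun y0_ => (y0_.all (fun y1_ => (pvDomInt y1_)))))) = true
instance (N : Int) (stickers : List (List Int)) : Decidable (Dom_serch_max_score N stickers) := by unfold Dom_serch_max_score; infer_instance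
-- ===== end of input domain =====

-- B replaces A's bottom-up table fill by a demand-driven top-down memoized evaluation of the
-- same recurrence (explicit goal stack + per-row memo dicts); no speed claim.

-- ===== PORT A =====
-- stickers[r][c]: exact on Pre_ (rows 0 and 1 exist, indices 0 ≤ c < row length);
-- outside Pre_ Python raises IndexError.
def pyAt (s : List (List Int)) (r c : Nat) : Int := (s.getD r []).getD c 0

def initA (s : List (List Int)) (n : Nat) : List Int × List Int :=
  (((List.replicate n (0:Int)).set 0 (pyAt s 0 0)).set 1 (pyAt s 0 1 + pyAt s 1 0),
   ((List.replicate n (0:Int)).set 0 (pyAt s 1 0)).set 1 (pyAt s 1 1 + pyAt s 0 0))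

def stepA (s : List (List Int)) (p : List Int × List Int) (ii : Int) : List Int × List Int :=
  let i := ii.toNat
  let m0 := p.1.set i (max (p.2.getD (i-1) 0) (p.2.getD (i-2) 0) + pyAt s 0 i)
  let m1 := p.2.set i (max (m0.getD (i-1) 0) (m0.getD (i-2) 0) + pyAt s 1 i)
  (m0, m1)

def serch_max_score (N : Int) (stickers : List (List Int)) : Int :=
  if N = 1 then max (pyAt stickers 0 0) (pyAt stickers 1 0)
  else
    let n := N.toNat
    let st := (PySem.List.pyRange 2 N 1).foldl (stepA stickers) (initA stickers n)
    max (st.1.getD (n-1) 0) (st.2.getD (n-1) 0)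

-- ===== PORT B =====
-- the while loop over the explicit goal stack; fuel only makes the recursion total
-- (inside Pre_ the stack empties long before the fuel runs out, see runB_ok below)
def runB (s : List (List Int)) :
    Nat → List (Int × Int × Bool) → PySem.Dict Int Int → PySem.Dict Int Int →
    PySem.Dict Int Int × PySem.Dict Int Int
  | _, [], top, bot => (top, bot)
  | 0, _, top, bot => (top, bot)
  | fuel+1, (row, i, expanded) :: rest, top, bot =>
    if row = 0 then
      if expanded then
        runB s fuel rest
          (top.insert i (pyAt s 0 i.toNat + max (bot.getD (i-1) 0) (bot.getD (i-2) 0))) bot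
      else if (top.get? i).isSome then runB s fuel rest top bot
      else runB s fuel ((1 - row, i - 2, false) :: (1 - row, i - 1, false) :: (row, i, true) :: rest) top bot
    else
      if expanded then
        runB s fuel rest top
          (bot.insert i (pyAt s 1 i.toNat + max (top.getD (i-1) 0) (top.getD (i-2) 0)))
      else if (bot.get? i).isSome then runB s fuel rest top bot
      else runB s fuel ((1 - row, i - 2, false) :: (1 - row, i - 1, false) :: (row, i, true) :: rest) top bot

def serch_max_score_alt (N : Int) (stickers : List (List Int)) : Int :=
  if N = 1 then max (pyAt stickers 0 0) (pyAt stickers 1 0)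
  else
    let top0 := ((PySem.Dict.empty : PySem.Dict Int Int).insert 0 (pyAt stickers 0 0)).insert 1
      (pyAt stickers 0 1 + pyAt stickers 1 0)
    let bot0 := ((PySem.Dict.empty : PySem.Dict Int Int).insert 0 (pyAt stickers 1 0)).insert 1
      (pyAt stickers 1 1 + pyAt stickers 0 0)
    let st := runB stickers (2 ^ (N.toNat + 2)) [(0, N - 1, false), (1, N - 1, false)] top0 bot0
    max (st.1.getD (N - 1) 0) (st.2.getD (N - 1) 0)

-- ===== PRECONDITION & SPEC =====
-- Pre_ = exactly the inputs where A returns: N ≥ 1, both rows exist and have length ≥ N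
-- (otherwise A raises IndexError).
def Pre_serch_max_score (N : Int) (stickers : List (List Int)) : Prop :=
  1 ≤ N ∧ 2 ≤ stickers.length ∧ N ≤ (stickers.getD 0 []).length ∧ N ≤ (stickers.getD 1 []).length
instance (N : Int) (stickers : List (List Int)) : Decidable (Pre_serch_max_score N stickers) := by
  unfold Pre_serch_max_score; infer_instance

def pvWitness_serch_max_score : Int × List (List Int) := (2, [[1, 2], [3, 4]])

def Spec_serch_max_score (N : Int) (stickers : List (List Int)) (out : Int) : Prop := out = serch_max_score_alt N stickers
instance (N : Int) (stickers : List (List Int)) (out : Int) : Decidable (Spec_serch_max_score N stickers out) := by unfold Spec_serch_max_score; infer_instance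

-- ===== CLAIM (what is proved, stated in full; the proofs are below) =====
def Claim_equal_serch_max_score : Prop := ∀ (N : Int) (stickers : List (List Int)), Dom_serch_max_score N stickers → Pre_serch_max_score N stickers → Spec_serch_max_score N stickers (serch_max_score N stickers)

-- ===== LEMMAS AND PROOFS =====

-- the common mathematical recurrence both programs compute
mutual
def topSpec (s : List (List Int)) : Nat → Int
  | 0 => pyAt s 0 0
  | 1 => pyAt s 0 1 + pyAt s 1 0
  | n+2 => pyAt s 0 (n+2) + max (botSpec s (n+1)) (botSpec s n)
def botSpec (s : List (List Int)) : Nat → Int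
  | 0 => pyAt s 1 0
  | 1 => pyAt s 1 1 + pyAt s 0 0
  | n+2 => pyAt s 1 (n+2) + max (topSpec s (n+1)) (topSpec s n)
end

lemma getD_set_self (l : List Int) (i : Nat) (v : Int) (h : i < l.length) :
    (l.set i v).getD i 0 = v := by
  simp [List.getD, h]

lemma getD_set_ne (l : List Int) (i j : Nat) (v : Int) (h : i ≠ j) :
    (l.set i v).getD j 0 = l.getD j 0 := by
  simp [List.getD, h]

-- A's table after processing columns 2..k-1 holds the spec values at 0..k-1
lemma foldA_spec (s : List (List Int)) (n : Nat) (h2 : 2 ≤ n) :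
    ∀ (k : Nat), 2 ≤ k → k ≤ n →
    (((PySem.List.pyRange 2 (k:Int) 1).foldl (stepA s) (initA s n)).1.length = n ∧
     ((PySem.List.pyRange 2 (k:Int) 1).foldl (stepA s) (initA s n)).2.length = n) ∧
    (∀ j, j < k →
      ((PySem.List.pyRange 2 (k:Int) 1).foldl (stepA s) (initA s n)).1.getD j 0 = topSpec s j ∧
      ((PySem.List.pyRange 2 (k:Int) 1).foldl (stepA s) (initA s n)).2.getD j 0 = botSpec s j) := by
  intro k h2k
  induction k, h2k using Nat.le_induction with
  | base =>
    intro hn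
    rw [show ((2:Nat):Int) = 2 by norm_num, PySem.List.pyRange_one_eq_nil (by norm_num)]
    simp only [List.foldl_nil]
    refine ⟨⟨by simp [initA], by simp [initA]⟩, ?_⟩
    intro j hj
    have h0 : (0:Nat) < n := by omega
    have h1 : (1:Nat) < n := by omega
    interval_cases j
    · simp only [initA, topSpec, botSpec]
      rw [getD_set_ne _ 1 0 _ (by omega), getD_set_self _ 0 _ (by simpa using h0),
          getD_set_ne _ 1 0 _ (by omega), getD_set_self _ 0 _ (by simpa using h0)]
      exact ⟨rfl, rfl⟩
    · simp only [initA, topSpec, botSpec]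
      rw [getD_set_self _ 1 _ (by simpa using h1), getD_set_self _ 1 _ (by simpa using h1)]
      exact ⟨rfl, rfl⟩
  | succ k hk ih =>
    intro hkn
    have hk' : k ≤ n := by omega
    obtain ⟨⟨hl1, hl2⟩, hval⟩ := ih hk'
    have hcast : ((k+1:Nat):Int) = (k:Int) + 1 := by push_cast; ring
    rw [hcast, PySem.List.pyRange_one_succ_right (by exact_mod_cast by omega : (2:Int) ≤ (k:Int)),
        List.foldl_append]
    set pa := (PySem.List.pyRange 2 (k:Int) 1).foldl (stepA s) (initA s n) with hpa
    simp only [List.foldl_cons, List.foldl_nil]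
    have hiN : ((k:Int)).toNat = k := Int.toNat_natCast k
    have hkn' : k < n := by omega
    simp only [stepA, hiN]
    constructor
    · constructor
      · simp [hl1]
      · simp [hl2]
    · intro j hj
      have e1 : ∀ v : Int, (pa.1.set k v).getD (k-1) 0 = pa.1.getD (k-1) 0 :=
        fun v => getD_set_ne _ k (k-1) v (by omega)
      have e2 : ∀ v : Int, (pa.1.set k v).getD (k-2) 0 = pa.1.getD (k-2) 0 :=
        fun v => getD_set_ne _ k (k-2) v (by omega)
      obtain ⟨ht1, hb1⟩ := hval (k-1) (by omega)
      obtain ⟨ht2, hb2⟩ := hval (k-2) (by omega)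
      by_cases hjk : j = k
      · subst hjk
        have hset1 : (pa.1.set j (max (pa.2.getD (j-1) 0) (pa.2.getD (j-2) 0) + pyAt s 0 j)).getD j 0
            = max (pa.2.getD (j-1) 0) (pa.2.getD (j-2) 0) + pyAt s 0 j :=
          getD_set_self _ j _ (by omega)
        have hset2 : ∀ w, (pa.2.set j w).getD j 0 = w :=
          fun w => getD_set_self _ j _ (by omega)
        rw [hset1, hset2, e1, e2, hb1, hb2, ht1, ht2]
        obtain ⟨m, hm⟩ : ∃ m, j = m + 2 := ⟨j - 2, by omega⟩
        subst hm
        constructor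
        · show _ = topSpec s (m+2)
          simp only [topSpec, show m+2-1 = m+1 by omega, show m+2-2 = m by omega]
          ring
        · show _ = botSpec s (m+2)
          simp only [botSpec, show m+2-1 = m+1 by omega, show m+2-2 = m by omega]
          ring
      · have hjk' : j < k := by omega
        obtain ⟨htj, hbj⟩ := hval j hjk'
        constructor
        · rw [getD_set_ne _ k j _ (by omega)]; exact htj
        · rw [getD_set_ne _ k j _ (by omega)]; exact hbj

-- ---- B-side invariants ----
def dsel (r : Int) (T B : PySem.Dict Int Int) : PySem.Dict Int Int := if r = 0 then T else B

def fsel (r : Int) : List (List Int) → Nat → Int := if r = 0 then topSpec else botSpec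

def memOK (s : List (List Int)) (d : PySem.Dict Int Int) (f : List (List Int) → Nat → Int) : Prop :=
  ∀ i v, d.get? i = some v → 0 ≤ i ∧ v = f s i.toNat

def Res (T B : PySem.Dict Int Int) (pre : List (Int × Int × Bool)) (r j : Int) : Prop :=
  ((dsel r T B).get? j).isSome = true ∨ ∃ b, (r, j, b) ∈ pre

def SOK (T B : PySem.Dict Int Int) (st : List (Int × Int × Bool)) : Prop :=
  (∀ e ∈ st, (e.1 = 0 ∨ e.1 = 1) ∧ 0 ≤ e.2.1) ∧
  (∀ pre r i post, st = pre ++ (r, i, true) :: post →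
    2 ≤ i ∧ Res T B pre (1 - r) (i - 1) ∧ Res T B pre (1 - r) (i - 2))

def DLe (d d' : PySem.Dict Int Int) : Prop :=
  ∀ i, (d.get? i).isSome = true → (d'.get? i).isSome = true

def pot : List (Int × Int × Bool) → Nat
  | [] => 0
  | (_, i, e) :: rest => (if e then 1 else 2 ^ (i.toNat + 1)) + pot rest

lemma isSome_insert (d : PySem.Dict Int Int) (k k' v : Int)
    (h : (d.get? k').isSome = true) : ((d.insert k v).get? k').isSome = true := by
  rw [PySem.Dict.get?_insert]; split <;> simp [h]

lemma isSome_insert_self (d : PySem.Dict Int Int) (k v : Int) :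
    ((d.insert k v).get? k).isSome = true := by
  simp [PySem.Dict.get?_insert_self]

lemma DLe_refl (d : PySem.Dict Int Int) : DLe d d := fun _ h => h

lemma DLe_trans {d1 d2 d3 : PySem.Dict Int Int} (h1 : DLe d1 d2) (h2 : DLe d2 d3) : DLe d1 d3 :=
  fun i h => h2 i (h1 i h)

lemma DLe_insert (d : PySem.Dict Int Int) (k v : Int) : DLe d (d.insert k v) :=
  fun i h => isSome_insert d k i v h

lemma dsel_DLe {T B T' B' : PySem.Dict Int Int} (r : Int) (hT : DLe T T') (hB : DLe B B') :
    DLe (dsel r T B) (dsel r T' B') := by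
  unfold dsel; split <;> assumption

lemma Res_weaken {T B T' B' : PySem.Dict Int Int} {pre pre' : List (Int × Int × Bool)} {r j : Int}
    (hT : DLe T T') (hB : DLe B B')
    (h : ∀ r0 i0, (∃ b, (r0, i0, b) ∈ pre) →
      ((dsel r0 T' B').get? i0).isSome = true ∨ ∃ b, (r0, i0, b) ∈ pre') :
    Res T B pre r j → Res T' B' pre' r j := by
  rintro (hs | hm)
  · exact Or.inl (dsel_DLe r hT hB j hs)
  · rcases h r j hm with hs | hm' <;> [exact Or.inl hs; exact Or.inr hm']

lemma runB_ok (s : List (List Int)) :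
    ∀ (fuel : Nat) (st : List (Int × Int × Bool)) (T B : PySem.Dict Int Int),
    memOK s T topSpec → memOK s B botSpec →
    (T.get? 0).isSome = true → (T.get? 1).isSome = true →
    (B.get? 0).isSome = true → (B.get? 1).isSome = true →
    SOK T B st → pot st ≤ fuel →
    memOK s (runB s fuel st T B).1 topSpec ∧ memOK s (runB s fuel st T B).2 botSpec ∧
    DLe T (runB s fuel st T B).1 ∧ DLe B (runB s fuel st T B).2 ∧
    ∀ e ∈ st, ((dsel e.1 (runB s fuel st T B).1 (runB s fuel st T B).2).get? e.2.1).isSome = true := by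
  intro fuel
  induction fuel with
  | zero =>
    intro st T B hmT hmB t0 t1 b0 b1 hsok hpot
    cases st with
    | nil =>
      simp only [runB]
      exact ⟨hmT, hmB, DLe_refl T, DLe_refl B, by intro e he; simp at he⟩
    | cons e rest =>
      exfalso
      obtain ⟨r, i, b⟩ := e
      have h1 : 1 ≤ (if b then 1 else 2 ^ (i.toNat + 1)) := by
        cases b
        · simpa using Nat.one_le_two_pow
        · simp
      simp only [pot] at hpot
      omega
  | succ fuel ih =>
    intro st T B hmT hmB t0 t1 b0 b1 hsok hpot
    cases st with
    | nil =>
      simp only [runB]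
      exact ⟨hmT, hmB, DLe_refl T, DLe_refl B, by intro e he; simp at he⟩
    | cons e rest =>
      obtain ⟨r, i, b⟩ := e
      obtain ⟨hrows, htrue⟩ := hsok
      have hre := hrows (r, i, b) (List.mem_cons_self ..)
      have hi0 : 0 ≤ i := hre.2
      rcases hre.1 with hr | hr
      · -- row 0
        subst hr
        cases b with
        | true =>
          obtain ⟨hi2, hres1, hres2⟩ := htrue [] 0 i rest rfl
          have hdB : dsel (1 - (0:Int)) T B = B := by norm_num [dsel]
          have hB1 : (B.get? (i-1)).isSome = true := by
            rcases hres1 with h | ⟨bb, hbb⟩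
            · rwa [hdB] at h
            · exact absurd hbb (List.not_mem_nil)
          have hB2 : (B.get? (i-2)).isSome = true := by
            rcases hres2 with h | ⟨bb, hbb⟩
            · rwa [hdB] at h
            · exact absurd hbb (List.not_mem_nil)
          obtain ⟨v1, hv1⟩ := Option.isSome_iff_exists.mp hB1
          obtain ⟨v2, hv2⟩ := Option.isSome_iff_exists.mp hB2
          obtain ⟨h01, hv1s⟩ := hmB _ _ hv1
          obtain ⟨h02, hv2s⟩ := hmB _ _ hv2
          set val := pyAt s 0 i.toNat + max (B.getD (i-1) 0) (B.getD (i-2) 0) with hvaldef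
          have hgd1 : B.getD (i-1) 0 = v1 := by rw [PySem.Dict.getD_eq_get?_getD, hv1]; rfl
          have hgd2 : B.getD (i-2) 0 = v2 := by rw [PySem.Dict.getD_eq_get?_getD, hv2]; rfl
          have hvspec : val = topSpec s i.toNat := by
            obtain ⟨m, hm1, hm2, hm3⟩ : ∃ m, i.toNat = m + 2 ∧ (i-1).toNat = m+1 ∧ (i-2).toNat = m :=
              ⟨i.toNat - 2, by omega⟩
            rw [hvaldef, hgd1, hgd2, hv1s, hv2s, hm1, hm2, hm3]
            simp [topSpec]
          have hmT' : memOK s (T.insert i val) topSpec := by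
            intro j v hv
            rw [PySem.Dict.get?_insert] at hv
            split_ifs at hv with hji
            · subst hji
              refine ⟨by omega, ?_⟩
              rw [← Option.some.inj hv, hvspec]
            · exact hmT _ _ hv
          have hsok' : SOK (T.insert i val) B rest := by
            constructor
            · intro e he; exact hrows e (List.mem_cons_of_mem _ he)
            · intro pre r' i' post hsplit
              obtain ⟨h2', hr1, hr2⟩ := htrue ((0, i, true) :: pre) r' i' post (by simp [hsplit])
              have hwk : ∀ r0 i0, (∃ bb, (r0, i0, bb) ∈ (0, i, true) :: pre) →
                  ((dsel r0 (T.insert i val) B).get? i0).isSome = true ∨ ∃ bb, (r0, i0, bb) ∈ pre := by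
                rintro r0 i0 ⟨bb, hbb⟩
                rcases List.mem_cons.mp hbb with heq | hmem
                · obtain ⟨h1, h2, -⟩ : r0 = 0 ∧ i0 = i ∧ bb = true := by
                    simpa [Prod.ext_iff] using heq
                  subst h1; subst h2
                  left
                  simp [dsel]
                · exact Or.inr ⟨bb, hmem⟩
              exact ⟨h2', Res_weaken (DLe_insert T i val) (DLe_refl B) hwk hr1,
                     Res_weaken (DLe_insert T i val) (DLe_refl B) hwk hr2⟩
          have hpot' : pot rest ≤ fuel := by
            simp [pot] at hpot
            omega
          obtain ⟨m1, m2, dl1, dl2, hall⟩ := ih rest (T.insert i val) B hmT' hmB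
            (isSome_insert _ _ _ _ t0) (isSome_insert _ _ _ _ t1) b0 b1 hsok' hpot'
          have hred : runB s (fuel+1) (((0:Int), i, true) :: rest) T B
              = runB s fuel rest (T.insert i val) B := by
            simp [runB, hvaldef]
          rw [hred]
          refine ⟨m1, m2, DLe_trans (DLe_insert T i val) dl1, dl2, ?_⟩
          intro e he
          rcases List.mem_cons.mp he with rfl | hmem
          · simpa [dsel] using dl1 i (isSome_insert_self T i val)
          · exact hall e hmem
        | false =>
          by_cases hTi : (T.get? i).isSome = true
          · have hred : runB s (fuel+1) (((0:Int), i, false) :: rest) T B = runB s fuel rest T B := by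
              simp [runB, hTi]
            have hsok' : SOK T B rest := by
              constructor
              · intro e he; exact hrows e (List.mem_cons_of_mem _ he)
              · intro pre r' i' post hsplit
                obtain ⟨h2', hr1, hr2⟩ := htrue ((0, i, false) :: pre) r' i' post (by simp [hsplit])
                have hwk : ∀ r0 i0, (∃ bb, (r0, i0, bb) ∈ (0, i, false) :: pre) →
                    ((dsel r0 T B).get? i0).isSome = true ∨ ∃ bb, (r0, i0, bb) ∈ pre := by
                  rintro r0 i0 ⟨bb, hbb⟩
                  rcases List.mem_cons.mp hbb with heq | hmem
                  · obtain ⟨h1, h2, -⟩ : r0 = 0 ∧ i0 = i ∧ bb = false := by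
                      simpa [Prod.ext_iff] using heq
                    subst h1; subst h2
                    left
                    simpa [dsel] using hTi
                  · exact Or.inr ⟨bb, hmem⟩
                exact ⟨h2', Res_weaken (DLe_refl T) (DLe_refl B) hwk hr1,
                       Res_weaken (DLe_refl T) (DLe_refl B) hwk hr2⟩
            have hpot' : pot rest ≤ fuel := by
              have h1 : 1 ≤ 2 ^ (i.toNat + 1) := Nat.one_le_two_pow
              simp only [pot, if_neg (Bool.false_ne_true)] at hpot
              omega
            obtain ⟨m1, m2, dl1, dl2, hall⟩ := ih rest T B hmT hmB t0 t1 b0 b1 hsok' hpot'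
            rw [hred]
            refine ⟨m1, m2, dl1, dl2, ?_⟩
            intro e he
            rcases List.mem_cons.mp he with rfl | hmem
            · simpa [dsel] using dl1 i hTi
            · exact hall e hmem
          · have hi2 : 2 ≤ i := by
              rcases (by omega : i = 0 ∨ i = 1 ∨ 2 ≤ i) with h | h | h
              · exact absurd (h ▸ t0) hTi
              · exact absurd (h ▸ t1) hTi
              · exact h
            have hsok' : SOK T B (((1:Int), i-2, false) :: ((1:Int), i-1, false) :: ((0:Int), i, true) :: rest) := by
              constructor
              · intro e he
                rcases List.mem_cons.mp he with rfl | he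
                · exact ⟨Or.inr rfl, by exact (by omega : (0:Int) ≤ i - 2)⟩
                rcases List.mem_cons.mp he with rfl | he
                · exact ⟨Or.inr rfl, by exact (by omega : (0:Int) ≤ i - 1)⟩
                rcases List.mem_cons.mp he with rfl | he
                · exact ⟨Or.inl rfl, hi0⟩
                · exact hrows e (List.mem_cons_of_mem _ he)
              · intro pre r' i' post hsplit
                match pre, hsplit with
                | [], hsplit => 
                  simp only [List.nil_append, List.cons.injEq, Prod.mk.injEq] at hsplit
                  exact absurd hsplit.1.2.2.symm (by simp)
                | [a], hsplit =>
                  simp only [List.cons_append, List.nil_append, List.cons.injEq, Prod.mk.injEq] at hsplit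
                  exact absurd hsplit.2.1.2.2.symm (by simp)
                | [a, a2], hsplit =>
                  simp only [List.cons_append, List.nil_append, List.cons.injEq, Prod.mk.injEq] at hsplit
                  obtain ⟨ha, ha2, ⟨hr0, hii, -⟩, hpost⟩ := hsplit
                  subst hr0; subst hii
                  refine ⟨hi2, ?_, ?_⟩
                  · exact Or.inr ⟨false, by rw [← ha2]; norm_num⟩
                  · exact Or.inr ⟨false, by rw [← ha]; norm_num⟩
                | a :: a2 :: a3 :: pre3, hsplit =>
                  simp only [List.cons_append, List.cons.injEq] at hsplit
                  obtain ⟨ha, ha2, ha3, hrest⟩ := hsplit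
                  obtain ⟨h2', hr1, hr2⟩ := htrue ((0, i, false) :: pre3) r' i' post (by simp [hrest])
                  have hwk : ∀ r0 i0, (∃ bb, (r0, i0, bb) ∈ ((0:Int), i, false) :: pre3) →
                      ((dsel r0 T B).get? i0).isSome = true ∨ ∃ bb, (r0, i0, bb) ∈ a :: a2 :: a3 :: pre3 := by
                    rintro r0 i0 ⟨bb, hbb⟩
                    rcases List.mem_cons.mp hbb with heq | hmem
                    · obtain ⟨h1, h2, -⟩ : r0 = 0 ∧ i0 = i ∧ bb = false := by
                        simpa [Prod.ext_iff] using heq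
                      subst h1; subst h2
                      refine Or.inr ⟨true, ?_⟩
                      rw [← ha3]
                      simp
                    · exact Or.inr ⟨bb, by simp [hmem]⟩
                  exact ⟨h2', Res_weaken (DLe_refl T) (DLe_refl B) hwk hr1,
                         Res_weaken (DLe_refl T) (DLe_refl B) hwk hr2⟩
            have hpot' : pot (((1:Int), i-2, false) :: ((1:Int), i-1, false) :: ((0:Int), i, true) :: rest) ≤ fuel := by
              obtain ⟨m, hm1, hm2, hm3⟩ : ∃ m, i.toNat = m + 2 ∧ (i-1).toNat = m+1 ∧ (i-2).toNat = m :=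
                ⟨i.toNat - 2, by omega⟩
              simp [pot, hm1, hm2, hm3] at hpot ⊢
              have e1 : 2 ^ (m + 1 + 1) = 4 * 2 ^ m := by ring
              have e2 : 2 ^ (m + 1) = 2 * 2 ^ m := by ring
              have e3 : 2 ^ (m + 2 + 1) = 8 * 2 ^ m := by ring
              have e4 : 1 ≤ 2 ^ m := Nat.one_le_two_pow
              omega
            obtain ⟨m1, m2, dl1, dl2, hall⟩ := ih _ T B hmT hmB t0 t1 b0 b1 hsok' hpot'
            have hred : runB s (fuel+1) (((0:Int), i, false) :: rest) T B
                = runB s fuel (((1:Int), i-2, false) :: ((1:Int), i-1, false) :: ((0:Int), i, true) :: rest) T B := by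
              simp [runB, hTi]
            rw [hred]
            refine ⟨m1, m2, dl1, dl2, ?_⟩
            intro e he
            rcases List.mem_cons.mp he with rfl | hmem
            · exact hall ((0:Int), i, true) (by simp)
            · exact hall e (by simp [hmem])
      · -- row 1
        subst hr
        cases b with
        | true =>
          obtain ⟨hi2, hres1, hres2⟩ := htrue [] 1 i rest rfl
          have hdT : dsel (1 - (1:Int)) T B = T := by norm_num [dsel]
          have hT1 : (T.get? (i-1)).isSome = true := by
            rcases hres1 with h | ⟨bb, hbb⟩
            · rwa [hdT] at h
            · exact absurd hbb (List.not_mem_nil)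
          have hT2 : (T.get? (i-2)).isSome = true := by
            rcases hres2 with h | ⟨bb, hbb⟩
            · rwa [hdT] at h
            · exact absurd hbb (List.not_mem_nil)
          obtain ⟨v1, hv1⟩ := Option.isSome_iff_exists.mp hT1
          obtain ⟨v2, hv2⟩ := Option.isSome_iff_exists.mp hT2
          obtain ⟨h01, hv1s⟩ := hmT _ _ hv1
          obtain ⟨h02, hv2s⟩ := hmT _ _ hv2
          set val := pyAt s 1 i.toNat + max (T.getD (i-1) 0) (T.getD (i-2) 0) with hvaldef
          have hgd1 : T.getD (i-1) 0 = v1 := by rw [PySem.Dict.getD_eq_get?_getD, hv1]; rfl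
          have hgd2 : T.getD (i-2) 0 = v2 := by rw [PySem.Dict.getD_eq_get?_getD, hv2]; rfl
          have hvspec : val = botSpec s i.toNat := by
            obtain ⟨m, hm1, hm2, hm3⟩ : ∃ m, i.toNat = m + 2 ∧ (i-1).toNat = m+1 ∧ (i-2).toNat = m :=
              ⟨i.toNat - 2, by omega⟩
            rw [hvaldef, hgd1, hgd2, hv1s, hv2s, hm1, hm2, hm3]
            simp [botSpec]
          have hmB' : memOK s (B.insert i val) botSpec := by
            intro j v hv
            rw [PySem.Dict.get?_insert] at hv
            split_ifs at hv with hji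
            · subst hji
              refine ⟨by omega, ?_⟩
              rw [← Option.some.inj hv, hvspec]
            · exact hmB _ _ hv
          have hsok' : SOK T (B.insert i val) rest := by
            constructor
            · intro e he; exact hrows e (List.mem_cons_of_mem _ he)
            · intro pre r' i' post hsplit
              obtain ⟨h2', hr1, hr2⟩ := htrue ((1, i, true) :: pre) r' i' post (by simp [hsplit])
              have hwk : ∀ r0 i0, (∃ bb, (r0, i0, bb) ∈ ((1:Int), i, true) :: pre) →
                  ((dsel r0 T (B.insert i val)).get? i0).isSome = true ∨ ∃ bb, (r0, i0, bb) ∈ pre := by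
                rintro r0 i0 ⟨bb, hbb⟩
                rcases List.mem_cons.mp hbb with heq | hmem
                · obtain ⟨h1, h2, -⟩ : r0 = 1 ∧ i0 = i ∧ bb = true := by
                    simpa [Prod.ext_iff] using heq
                  subst h1; subst h2
                  left
                  simp [dsel]
                · exact Or.inr ⟨bb, hmem⟩
              exact ⟨h2', Res_weaken (DLe_refl T) (DLe_insert B i val) hwk hr1,
                     Res_weaken (DLe_refl T) (DLe_insert B i val) hwk hr2⟩
          have hpot' : pot rest ≤ fuel := by
            simp [pot] at hpot
            omega
          obtain ⟨m1, m2, dl1, dl2, hall⟩ := ih rest T (B.insert i val) hmT hmB'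
            t0 t1 (isSome_insert _ _ _ _ b0) (isSome_insert _ _ _ _ b1) hsok' hpot'
          have hred : runB s (fuel+1) (((1:Int), i, true) :: rest) T B
              = runB s fuel rest T (B.insert i val) := by
            simp [runB, hvaldef]
          rw [hred]
          refine ⟨m1, m2, dl1, DLe_trans (DLe_insert B i val) dl2, ?_⟩
          intro e he
          rcases List.mem_cons.mp he with rfl | hmem
          · simpa [dsel] using dl2 i (isSome_insert_self B i val)
          · exact hall e hmem
        | false =>
          by_cases hBi : (B.get? i).isSome = true
          · have hred : runB s (fuel+1) (((1:Int), i, false) :: rest) T B = runB s fuel rest T B := by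
              simp [runB, hBi]
            have hsok' : SOK T B rest := by
              constructor
              · intro e he; exact hrows e (List.mem_cons_of_mem _ he)
              · intro pre r' i' post hsplit
                obtain ⟨h2', hr1, hr2⟩ := htrue ((1, i, false) :: pre) r' i' post (by simp [hsplit])
                have hwk : ∀ r0 i0, (∃ bb, (r0, i0, bb) ∈ ((1:Int), i, false) :: pre) →
                    ((dsel r0 T B).get? i0).isSome = true ∨ ∃ bb, (r0, i0, bb) ∈ pre := by
                  rintro r0 i0 ⟨bb, hbb⟩
                  rcases List.mem_cons.mp hbb with heq | hmem
                  · obtain ⟨h1, h2, -⟩ : r0 = 1 ∧ i0 = i ∧ bb = false := by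
                      simpa [Prod.ext_iff] using heq
                    subst h1; subst h2
                    left
                    simpa [dsel] using hBi
                  · exact Or.inr ⟨bb, hmem⟩
                exact ⟨h2', Res_weaken (DLe_refl T) (DLe_refl B) hwk hr1,
                       Res_weaken (DLe_refl T) (DLe_refl B) hwk hr2⟩
            have hpot' : pot rest ≤ fuel := by
              have h1 : 1 ≤ 2 ^ (i.toNat + 1) := Nat.one_le_two_pow
              simp only [pot, if_neg (Bool.false_ne_true)] at hpot
              omega
            obtain ⟨m1, m2, dl1, dl2, hall⟩ := ih rest T B hmT hmB t0 t1 b0 b1 hsok' hpot'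
            rw [hred]
            refine ⟨m1, m2, dl1, dl2, ?_⟩
            intro e he
            rcases List.mem_cons.mp he with rfl | hmem
            · simpa [dsel] using dl2 i hBi
            · exact hall e hmem
          · have hi2 : 2 ≤ i := by
              rcases (by omega : i = 0 ∨ i = 1 ∨ 2 ≤ i) with h | h | h
              · exact absurd (h ▸ b0) hBi
              · exact absurd (h ▸ b1) hBi
              · exact h
            have hsok' : SOK T B (((0:Int), i-2, false) :: ((0:Int), i-1, false) :: ((1:Int), i, true) :: rest) := by
              constructor
              · intro e he
                rcases List.mem_cons.mp he with rfl | he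
                · exact ⟨Or.inl rfl, by exact (by omega : (0:Int) ≤ i - 2)⟩
                rcases List.mem_cons.mp he with rfl | he
                · exact ⟨Or.inl rfl, by exact (by omega : (0:Int) ≤ i - 1)⟩
                rcases List.mem_cons.mp he with rfl | he
                · exact ⟨Or.inr rfl, hi0⟩
                · exact hrows e (List.mem_cons_of_mem _ he)
              · intro pre r' i' post hsplit
                match pre, hsplit with
                | [], hsplit =>
                  simp only [List.nil_append, List.cons.injEq, Prod.mk.injEq] at hsplit
                  exact absurd hsplit.1.2.2.symm (by simp)
                | [a], hsplit =>
                  simp only [List.cons_append, List.nil_append, List.cons.injEq, Prod.mk.injEq] at hsplit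
                  exact absurd hsplit.2.1.2.2.symm (by simp)
                | [a, a2], hsplit =>
                  simp only [List.cons_append, List.nil_append, List.cons.injEq, Prod.mk.injEq] at hsplit
                  obtain ⟨ha, ha2, ⟨hr0, hii, -⟩, hpost⟩ := hsplit
                  subst hr0; subst hii
                  refine ⟨hi2, ?_, ?_⟩
                  · exact Or.inr ⟨false, by rw [← ha2]; norm_num⟩
                  · exact Or.inr ⟨false, by rw [← ha]; norm_num⟩
                | a :: a2 :: a3 :: pre3, hsplit =>
                  simp only [List.cons_append, List.cons.injEq] at hsplit
                  obtain ⟨ha, ha2, ha3, hrest⟩ := hsplit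
                  obtain ⟨h2', hr1, hr2⟩ := htrue ((1, i, false) :: pre3) r' i' post (by simp [hrest])
                  have hwk : ∀ r0 i0, (∃ bb, (r0, i0, bb) ∈ ((1:Int), i, false) :: pre3) →
                      ((dsel r0 T B).get? i0).isSome = true ∨ ∃ bb, (r0, i0, bb) ∈ a :: a2 :: a3 :: pre3 := by
                    rintro r0 i0 ⟨bb, hbb⟩
                    rcases List.mem_cons.mp hbb with heq | hmem
                    · obtain ⟨h1, h2, -⟩ : r0 = 1 ∧ i0 = i ∧ bb = false := by
                        simpa [Prod.ext_iff] using heq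
                      subst h1; subst h2
                      refine Or.inr ⟨true, ?_⟩
                      rw [← ha3]
                      simp
                    · exact Or.inr ⟨bb, by simp [hmem]⟩
                  exact ⟨h2', Res_weaken (DLe_refl T) (DLe_refl B) hwk hr1,
                         Res_weaken (DLe_refl T) (DLe_refl B) hwk hr2⟩
            have hpot' : pot (((0:Int), i-2, false) :: ((0:Int), i-1, false) :: ((1:Int), i, true) :: rest) ≤ fuel := by
              obtain ⟨m, hm1, hm2, hm3⟩ : ∃ m, i.toNat = m + 2 ∧ (i-1).toNat = m+1 ∧ (i-2).toNat = m :=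
                ⟨i.toNat - 2, by omega⟩
              simp [pot, hm1, hm2, hm3] at hpot ⊢
              have e1 : 2 ^ (m + 1 + 1) = 4 * 2 ^ m := by ring
              have e2 : 2 ^ (m + 1) = 2 * 2 ^ m := by ring
              have e3 : 2 ^ (m + 2 + 1) = 8 * 2 ^ m := by ring
              have e4 : 1 ≤ 2 ^ m := Nat.one_le_two_pow
              omega
            obtain ⟨m1, m2, dl1, dl2, hall⟩ := ih _ T B hmT hmB t0 t1 b0 b1 hsok' hpot'
            have hred : runB s (fuel+1) (((1:Int), i, false) :: rest) T B
                = runB s fuel (((0:Int), i-2, false) :: ((0:Int), i-1, false) :: ((1:Int), i, true) :: rest) T B := by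
              simp [runB, hBi]
            rw [hred]
            refine ⟨m1, m2, dl1, dl2, ?_⟩
            intro e he
            rcases List.mem_cons.mp he with rfl | hmem
            · exact hall ((1:Int), i, true) (by simp)
            · exact hall e (by simp [hmem])

-- ===== VERDICT (by name: the statement is the Claim_ definition above) =====
theorem serch_max_score_spec : Claim_equal_serch_max_score := by
  intro N s _ hpre
  obtain ⟨hN1, hrows, hr0, hr1⟩ := hpre
  unfold Spec_serch_max_score serch_max_score serch_max_score_alt
  by_cases h1 : N = 1
  · simp [h1]
  · have hN2 : 2 ≤ N := by omega
    simp only [if_neg h1]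
    set n := N.toNat with hn
    have hn2 : 2 ≤ n := by omega
    have hNc : N = (n:Int) := by omega
    -- A's side
    obtain ⟨-, hval⟩ := foldA_spec s n hn2 n hn2 le_rfl
    obtain ⟨hA1, hA2⟩ := hval (n-1) (by omega)
    -- B's side
    set T0 := ((PySem.Dict.empty : PySem.Dict Int Int).insert 0 (pyAt s 0 0)).insert 1
      (pyAt s 0 1 + pyAt s 1 0) with hT0
    set B0 := ((PySem.Dict.empty : PySem.Dict Int Int).insert 0 (pyAt s 1 0)).insert 1
      (pyAt s 1 1 + pyAt s 0 0) with hB0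
    have hmT0 : memOK s T0 topSpec := by
      intro i v hv
      rw [hT0, PySem.Dict.get?_insert, PySem.Dict.get?_insert] at hv
      split_ifs at hv with hi1 hi0
      · subst hi1; exact ⟨by norm_num, by simpa [topSpec] using hv.symm⟩
      · subst hi0; exact ⟨le_refl 0, by simpa [topSpec] using hv.symm⟩
      · simp [PySem.Dict.get?_empty] at hv
    have hmB0 : memOK s B0 botSpec := by
      intro i v hv
      rw [hB0, PySem.Dict.get?_insert, PySem.Dict.get?_insert] at hv
      split_ifs at hv with hi1 hi0
      · subst hi1; exact ⟨by norm_num, by simpa [botSpec] using hv.symm⟩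
      · subst hi0; exact ⟨le_refl 0, by simpa [botSpec] using hv.symm⟩
      · simp [PySem.Dict.get?_empty] at hv
    have hs01 : ∀ (a b : Int), ((((PySem.Dict.empty : PySem.Dict Int Int).insert 0 a).insert 1 b).get? 0).isSome = true
        ∧ ((((PySem.Dict.empty : PySem.Dict Int Int).insert 0 a).insert 1 b).get? 1).isSome = true := by
      intro a b
      constructor <;> simp [PySem.Dict.get?_insert, PySem.Dict.get?_insert_self]
    have hsok : SOK T0 B0 [(0, N - 1, false), (1, N - 1, false)] := by
      constructor
      · intro e he
        simp only [List.mem_cons, List.not_mem_nil, or_false] at he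
        rcases he with rfl | rfl <;> constructor <;> simp <;> omega
      · intro pre r i post hsplit
        have hmem : (r, i, true) ∈ [((0:Int), N - 1, false), ((1:Int), N - 1, false)] := by
          rw [hsplit]; exact List.mem_append_right _ (List.mem_cons_self ..)
        simp only [List.mem_cons, List.not_mem_nil, or_false, Prod.mk.injEq] at hmem
        rcases hmem with ⟨-, -, hb⟩ | ⟨-, -, hb⟩ <;> exact absurd hb (by simp)
    have hpot : pot [((0:Int), N - 1, false), ((1:Int), N - 1, false)] ≤ 2 ^ (n + 2) := by
      have h1t : (N - 1).toNat = n - 1 := by omega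
      simp only [pot, if_neg (Bool.false_ne_true), h1t]
      have : n - 1 + 1 = n := by omega
      rw [this]
      have : 2 ^ n + (2 ^ n + 0) = 2 ^ (n + 1) := by ring
      rw [this]
      exact Nat.pow_le_pow_right (by norm_num) (by omega)
    obtain ⟨hmT, hmB, -, -, hall⟩ :=
      runB_ok s (2 ^ (n + 2)) [(0, N - 1, false), (1, N - 1, false)] T0 B0
        hmT0 hmB0 (hs01 _ _).1 (hs01 _ _).2 (hs01 _ _).1 (hs01 _ _).2 hsok hpot
    set res := runB s (2 ^ (n + 2)) [(0, N - 1, false), (1, N - 1, false)] T0 B0 with hres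
    have hT : (res.1.get? (N - 1)).isSome = true := by
      have := hall (0, N - 1, false) (by simp)
      simpa [dsel] using this
    have hB : (res.2.get? (N - 1)).isSome = true := by
      have := hall (1, N - 1, false) (by simp)
      simpa [dsel] using this
    obtain ⟨vT, hvT⟩ := Option.isSome_iff_exists.mp hT
    obtain ⟨vB, hvB⟩ := Option.isSome_iff_exists.mp hB
    have h1t : (N - 1).toNat = n - 1 := by omega
    have hvT' : vT = topSpec s (n - 1) := by have := hmT _ _ hvT; rw [this.2, h1t]
    have hvB' : vB = botSpec s (n - 1) := by have := hmB _ _ hvB; rw [this.2, h1t]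
    rw [hNc] at hvT hvB
    rw [hNc, hA1, hA2, PySem.Dict.getD_eq_get?_getD, PySem.Dict.getD_eq_get?_getD, hvT, hvB]
    simp [hvT', hvB']
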